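-- pv_equiv track=rewrite | github.com/tosin2013/code-index-mcp | src/code_index_mcp/tools/scip/analyzers/zig_analyzer.py | _extract_zig_local_module_path
-- ===== SOURCE A (Python) =====
-- from typing import Dict, List, Optional, Any, Set
--
-- def _extract_zig_local_module_path(descriptors: str) -> Optional[str]:
--     """
--     Extract local module path from descriptors for Zig.
--
--     Args:
--         descriptors: SCIP descriptors string
--
--     Returns:
--         Module path or None
--     """
--     try:
--         # Handle Zig descriptors like:
--         # 'test/sample-projects/zig/code-index-example/src/main.zig/std.' -> 'std'
--         # 'src/utils.zig/helper_function' -> 'utils'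
--         if '/' in descriptors:
--             parts = descriptors.split('/')
--             if len(parts) >= 2:
--                 # For Zig: if we have a .zig file, the symbol after it is the import
--                 for i, part in enumerate(parts):
--                     if part.endswith('.zig') and i + 1 < len(parts):
--                         # Next part is the imported symbol/module
--                         symbol_name = parts[i + 1].rstrip('.')
--                         return symbol_name
--
--                 # Fallback: traditional file-based extraction
--                 file_part = parts[0]
--                 if file_part.endswith('.zig'):
--                     return file_part[:-4]  # Remove .zig extension
--                 return file_part
--         return None
--     except Exception:
--         return None
-- ===== SOURCE B (Python) =====
-- from typing import Optional
--
-- def _extract_zig_local_module_path(descriptors: str) -> Optional[str]: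
--     """Locate the '.zig/' boundary directly in the raw string instead of
--     splitting into a parts list and scanning it by index."""
--     try:
--         if '/' in descriptors:
--             idx = descriptors.find('.zig/')
--             if idx != -1:
--                 return descriptors[idx + 5:].split('/', 1)[0].rstrip('.')
--             file_part = descriptors.split('/', 1)[0]
--             if file_part.endswith('.zig'):
--                 return file_part[:-4]
--             return file_part
--         return None
--     except Exception:
--         return None
-- ===== Notes on version B (the rewrite author's own statement) =====
-- stated objective: idiomatic
-- what changed: Replaces the split-into-parts list and the enumerate index-scan loop with a direct descriptors.find('.zig/') on the raw string, slicing out the following segment; the fallback uses split('/', 1) instead of a full split.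
import Mathlib
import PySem

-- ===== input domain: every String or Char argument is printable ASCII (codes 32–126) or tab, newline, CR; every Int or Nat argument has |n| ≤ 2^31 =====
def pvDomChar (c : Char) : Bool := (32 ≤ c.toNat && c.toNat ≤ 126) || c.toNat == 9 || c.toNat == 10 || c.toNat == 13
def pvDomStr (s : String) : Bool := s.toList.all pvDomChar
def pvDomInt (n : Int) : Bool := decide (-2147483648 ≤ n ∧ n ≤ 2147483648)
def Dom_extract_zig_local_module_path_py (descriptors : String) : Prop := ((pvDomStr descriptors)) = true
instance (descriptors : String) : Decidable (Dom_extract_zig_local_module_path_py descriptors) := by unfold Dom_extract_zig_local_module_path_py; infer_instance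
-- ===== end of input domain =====

-- B: find the '.zig/' boundary with str.find on the raw string instead of splitting into a parts
-- list and index-scanning it (same result; no speed claim).

-- shared primitive helper: s.rstrip('.') — drop '.' characters from the right end (exact; no
-- PySem one-sided rstrip-with-chars primitive exists)
def pvRstripDot (s : String) : String :=
  String.ofList ((s.toList.reverse.dropWhile (fun c => c == '.')).reverse)

-- ===== PORT A =====
-- the 'for i, part in enumerate(parts): if part.endswith('.zig') and i + 1 < len(parts): return
-- parts[i+1].rstrip('.')' loop, as structural recursion over adjacent pairs of parts
def pvZigLoop : List String → Option String
  | p :: q :: rest =>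
    if PySem.Str.endswith p ".zig" then some (pvRstripDot q)
    else pvZigLoop (q :: rest)
  | _ => none

def extract_zig_local_module_path_py (descriptors : String) : Option String :=
  if PySem.Str.isIn "/" descriptors then
    match PySem.Str.split? descriptors "/" with
    | none => none        -- unreachable (sep "/" is nonempty); the try/except returns None
    | some parts =>
      if 2 ≤ parts.length then
        match pvZigLoop parts with
        | some r => some r
        | none =>
          match parts with  -- file_part = parts[0]
          | [] => none      -- unreachable (split never returns []); the try/except returns None
          | filePart :: _ =>
            if PySem.Str.endswith filePart ".zig" then
              some (PySem.Str.slice filePart none (some (-4)))   -- file_part[:-4]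
            else some filePart
      else none
  else none

-- ===== PORT B =====
def extract_zig_local_module_path_py_alt (descriptors : String) : Option String :=
  if PySem.Str.isIn "/" descriptors then
    let idx := PySem.Str.find descriptors ".zig/"
    if idx ≠ -1 then
      match PySem.Str.splitMax? (PySem.Str.slice descriptors (some (idx + 5)) none) "/" 1 with
      | some (piece :: _) => some (pvRstripDot piece)   -- descriptors[idx+5:].split('/', 1)[0].rstrip('.')
      | _ => none       -- unreachable (sep "/" nonempty, split result nonempty); try/except returns None
    else
      match PySem.Str.splitMax? descriptors "/" 1 with  -- file_part = descriptors.split('/', 1)[0]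
      | some (filePart :: _) =>
        if PySem.Str.endswith filePart ".zig" then
          some (PySem.Str.slice filePart none (some (-4)))
        else some filePart
      | _ => none       -- unreachable; try/except returns None
  else none

-- ===== PRECONDITION & SPEC =====
def Spec_extract_zig_local_module_path_py (descriptors : String) (out : Option String) : Prop := out = extract_zig_local_module_path_py_alt descriptors
instance (descriptors : String) (out : Option String) : Decidable (Spec_extract_zig_local_module_path_py descriptors out) := by unfold Spec_extract_zig_local_module_path_py; infer_instance

-- ===== CLAIM (what is proved, stated in full; the proofs are below) =====
def Claim_equal_extract_zig_local_module_path_py : Prop := ∀ (descriptors : String), Dom_extract_zig_local_module_path_py descriptors → Spec_extract_zig_local_module_path_py descriptors (extract_zig_local_module_path_py descriptors)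

-- ===== LEMMAS AND PROOFS =====

-- clean recursive form of Python's s.split('/') (PySem.Chars.splitOn s ['/'])
def pvSplitAux (cur : List Char) : List Char → List (List Char)
  | [] => [cur.reverse]
  | c :: rest => if c = '/' then cur.reverse :: pvSplitAux [] rest else pvSplitAux (c :: cur) rest

lemma pvSplitOn_go_eq : ∀ (fuel : Nat) (l cur : List Char) (acc : List (List Char)),
    l.length ≤ fuel →
    PySem.Chars.splitOn.go ['/'] fuel l cur acc = acc.reverse ++ pvSplitAux cur l := by
  intro fuel
  induction fuel with
  | zero =>
    intro l cur acc h
    have : l = [] := List.eq_nil_of_length_eq_zero (Nat.le_zero.mp h)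
    subst this
    simp [PySem.Chars.splitOn.go, pvSplitAux]
  | succ n ih =>
    intro l cur acc h
    cases l with
    | nil => simp [PySem.Chars.splitOn.go, pvSplitAux]
    | cons c rest =>
      rw [PySem.Chars.splitOn.go.eq_def]
      by_cases hc : c = '/'
      · subst hc
        simp only [List.isPrefixOf, BEq.rfl, Bool.true_and, if_true]
        rw [ih]
        · simp [pvSplitAux]
        · simpa using Nat.le_of_succ_le_succ h
      · have : (['/'].isPrefixOf (c :: rest)) = false := by
          simp [List.isPrefixOf]
          exact fun hh => hc hh.symm
        simp only [this, Bool.false_eq_true, if_false]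
        rw [ih]
        · simp [pvSplitAux, hc]
        · simpa using Nat.le_of_succ_le_succ h

lemma pvSplitOnMax_go_zero (fuel : Nat) (l cur : List Char) (acc : List (List Char)) :
    PySem.Chars.splitOnMax.go ['/'] fuel 0 l cur acc = acc.reverse ++ [cur.reverse ++ l] := by
  cases fuel with
  | zero => simp [PySem.Chars.splitOnMax.go]
  | succ n => cases l with
    | nil => simp [PySem.Chars.splitOnMax.go]
    | cons c rest => rw [PySem.Chars.splitOnMax.go.eq_def]; simp

lemma pvSplitOnMax_go_one : ∀ (fuel : Nat) (l cur : List Char) (acc : List (List Char)),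
    l.length ≤ fuel →
    PySem.Chars.splitOnMax.go ['/'] fuel 1 l cur acc =
      acc.reverse ++ (if '/' ∈ l
        then [cur.reverse ++ l.takeWhile (· ≠ '/'), (l.dropWhile (· ≠ '/')).tail]
        else [cur.reverse ++ l]) := by
  intro fuel
  induction fuel with
  | zero =>
    intro l cur acc h
    have : l = [] := List.eq_nil_of_length_eq_zero (Nat.le_zero.mp h)
    subst this
    simp [PySem.Chars.splitOnMax.go]
  | succ n ih =>
    intro l cur acc h
    cases l with
    | nil => simp [PySem.Chars.splitOnMax.go]
    | cons c rest =>
      rw [PySem.Chars.splitOnMax.go.eq_def]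
      by_cases hc : c = '/'
      · subst hc
        simp only [List.isPrefixOf, BEq.rfl, Bool.true_and, if_true]
        rw [pvSplitOnMax_go_zero]
        simp [List.takeWhile, List.dropWhile]
      · have hpf : (['/'].isPrefixOf (c :: rest)) = false := by
          simp [List.isPrefixOf]
          exact fun hh => hc hh.symm
        simp only [hpf, Bool.false_eq_true, if_false]
        rw [ih rest (c :: cur) acc (by simpa using Nat.le_of_succ_le_succ h)]
        by_cases hm : '/' ∈ rest
        · simp [hm, hc]
        · simp [hm, hc, List.mem_cons]
          exact fun hh => hc hh.symm

lemma pvSplitMax_head (s : String) :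
    PySem.Str.splitMax? s "/" 1 =
      some (List.map String.ofList (if '/' ∈ s.toList
        then [s.toList.takeWhile (· ≠ '/'), (s.toList.dropWhile (· ≠ '/')).tail]
        else [s.toList])) := by
  rw [PySem.Str.splitMax?.eq_1, PySem.Chars.splitMax?.eq_1, PySem.Chars.splitOnMax.eq_1]
  have h1 : ("/" : String).toList = ['/'] := rfl
  rw [h1]
  rw [if_neg (by simp), if_neg (by norm_num)]
  rw [show ((1 : Int).toNat) = 1 from rfl]
  rw [pvSplitOnMax_go_one (s.toList.length + 1) s.toList [] [] (by omega)]
  simp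

lemma pvSplitAux_no_slash (l : List Char) : ∀ (cur : List Char), '/' ∉ l →
    pvSplitAux cur l = [cur.reverse ++ l] := by
  induction l with
  | nil => intro cur h; simp [pvSplitAux]
  | cons c rest ih =>
    intro cur h
    have hc : ¬ c = '/' := fun hh => h (by simp [hh])
    simp only [pvSplitAux, if_neg hc]
    rw [ih (c :: cur) (fun hm => h (by simp [hm]))]
    simp

lemma pvSplitAux_append (a : List Char) : ∀ (r cur : List Char), '/' ∉ a →
    pvSplitAux cur (a ++ '/' :: r) = (cur.reverse ++ a) :: pvSplitAux [] r := by
  induction a with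
  | nil => intro r cur _; simp [pvSplitAux]
  | cons c rest ih =>
    intro r cur h
    have hc : ¬ c = '/' := fun hh => h (by simp [hh])
    simp only [List.cons_append, pvSplitAux, if_neg hc]
    rw [ih r (c :: cur) (fun hm => h (by simp [hm]))]
    simp

lemma pvSplitAux_head (l : List Char) : ∀ (cur : List Char),
    ∃ t, pvSplitAux cur l = (cur.reverse ++ l.takeWhile (· ≠ '/')) :: t := by
  induction l with
  | nil => intro cur; exact ⟨[], by simp [pvSplitAux]⟩
  | cons c rest ih =>
    intro cur
    by_cases hc : c = '/'
    · subst hc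
      exact ⟨pvSplitAux [] rest, by simp [pvSplitAux]⟩
    · obtain ⟨t, ht⟩ := ih (c :: cur)
      refine ⟨t, ?_⟩
      simp only [pvSplitAux, if_neg hc, ht]
      simp [hc]

lemma pvSplitAux_ne_nil (l : List Char) : ∀ (cur : List Char), pvSplitAux cur l ≠ [] := by
  induction l with
  | nil => intro cur; simp [pvSplitAux]
  | cons c rest ih =>
    intro cur
    by_cases hc : c = '/' <;> simp [pvSplitAux, hc, ih]

lemma pvSplitAux_len2 (l : List Char) : ∀ (cur : List Char), '/' ∈ l →
    2 ≤ (pvSplitAux cur l).length := by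
  induction l with
  | nil => intro cur h; simp at h
  | cons c rest ih =>
    intro cur h
    by_cases hc : c = '/'
    · subst hc
      simp only [pvSplitAux, if_true, List.length_cons]
      have := List.length_pos_of_ne_nil (pvSplitAux_ne_nil rest [])
      omega
    · have hm : '/' ∈ rest := by
        rcases List.mem_cons.mp h with h1 | h1
        · exact absurd h1.symm hc
        · exact h1
      simpa [pvSplitAux, hc] using ih (c :: cur) hm

lemma pvInfix_of_prefix_drop {sub l : List Char} {n : Nat} (h : sub <+: l.drop n) : sub <:+: l :=
  h.isInfix.trans (List.drop_suffix n l).isInfix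

lemma pvFind_eq_of_min (l sub : List Char) (n : Nat)
    (h1 : sub <+: l.drop n) (h2 : ∀ i < n, ¬ sub <+: l.drop i) :
    PySem.Chars.find l sub = n := by
  have hinf : sub <:+: l := pvInfix_of_prefix_drop h1
  have hpos : 0 ≤ PySem.Chars.find l sub := (PySem.Chars.find_nonneg_iff l sub).mpr hinf
  obtain ⟨hocc, hmin⟩ := PySem.Chars.find_spec hpos
  have hne : (PySem.Chars.find l sub).toNat = n := by
    rcases Nat.lt_trichotomy (PySem.Chars.find l sub).toNat n with h | h | h
    · exact absurd hocc (h2 _ h)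
    · exact h
    · exact absurd h1 (hmin n h)
  omega

-- a prefix occurrence of ".zig/" transports its characters, as getElem? facts
lemma pvOcc_getElem {a r : List Char} {i : Nat}
    (h : ".zig/".toList <+: (a ++ '/' :: r).drop i) :
    ∀ k, k < 5 → (a ++ '/' :: r)[i + k]? = [('.' : Char), 'z', 'i', 'g', '/'][k]? := by
  intro k hk
  have hz : ".zig/".toList = [('.' : Char), 'z', 'i', 'g', '/'] := rfl
  rw [hz] at h
  obtain ⟨t, ht⟩ := h
  rw [← List.getElem?_drop, ← ht, List.getElem?_append_left (by simpa using hk)]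

lemma pvL_getElem_left {a r : List Char} {j : Nat} (hj : j < a.length) :
    (a ++ '/' :: r)[j]? = a[j]? := List.getElem?_append_left hj

lemma pvL_getElem_mid (a r : List Char) :
    (a ++ '/' :: r)[a.length]? = some '/' := by
  rw [List.getElem?_append_right (Nat.le_refl _)]
  simp

-- every occurrence of ".zig/" has its '/' at or past the separator
lemma pvOcc_slash {a r : List Char} {i : Nat} (ha : '/' ∉ a)
    (h : ".zig/".toList <+: (a ++ '/' :: r).drop i) : a.length ≤ i + 4 := by
  by_contra hlt
  rw [Nat.not_le] at hlt
  have h4 := pvOcc_getElem h 4 (by omega)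
  rw [pvL_getElem_left (by omega)] at h4
  have hmem : ('/' : Char) ∈ a := List.mem_of_getElem? (by simpa using h4)
  exact ha hmem

-- …and when a does not end in ".zig", every occurrence lies strictly past the separator
lemma pvOcc_lower {a r : List Char} (ha : '/' ∉ a) (hz : ¬ ".zig".toList <:+ a) :
    ∀ i, ".zig/".toList <+: (a ++ '/' :: r).drop i → a.length + 1 ≤ i := by
  intro i h
  have hm4 := pvOcc_slash ha h
  by_contra hle
  rw [Nat.not_le] at hle
  have hi : i ≤ a.length := by omega
  rcases Nat.lt_or_ge a.length (i + 4) with hgt | heq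
  · -- the separator index a.length is hit by a pattern position k ≤ 3, whose char is not '/'
    have hmem := pvOcc_getElem h (a.length - i) (by omega)
    rw [show i + (a.length - i) = a.length by omega, pvL_getElem_mid] at hmem
    have hk : a.length - i < 4 := by omega
    rcases (by omega : a.length - i = 0 ∨ a.length - i = 1 ∨ a.length - i = 2 ∨ a.length - i = 3) with h0 | h0 | h0 | h0 <;>
      rw [h0] at hmem <;> simp at hmem
  · -- i + 4 = a.length: then a ends in ".zig"
    have he : a.length = i + 4 := by omega
    apply hz
    have hdrop : a.drop i = ['.', 'z', 'i', 'g'] := by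
      apply List.ext_getElem?
      intro k
      by_cases hk : k < 4
      · rw [List.getElem?_drop]
        have h1 := pvOcc_getElem h k (by omega)
        rw [pvL_getElem_left (by omega : i + k < a.length)] at h1
        rw [h1]
        rcases (by omega : k = 0 ∨ k = 1 ∨ k = 2 ∨ k = 3) with h0 | h0 | h0 | h0 <;> rw [h0] <;> rfl
      · rw [List.getElem?_eq_none (by simp; omega), List.getElem?_eq_none (by simp; omega)]
    have hta : a = a.take i ++ ['.', 'z', 'i', 'g'] := by rw [← hdrop, List.take_append_drop]
    rw [show (".zig".toList) = [('.' : Char), 'z', 'i', 'g'] from rfl, hta]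
    exact List.suffix_append _ _

def pvZigLoopC : List (List Char) → Option (List Char)
  | p :: q :: rest =>
    if PySem.Chars.endswith p ".zig".toList then some ((q.reverse.dropWhile (fun c => c == '.')).reverse)
    else pvZigLoopC (q :: rest)
  | _ => none

-- decompose a list containing '/' as a ++ '/' :: r with '/' ∉ a, a = takeWhile (· ≠ '/')
lemma pvDecomp {l : List Char} (h : '/' ∈ l) :
    ∃ r, l = l.takeWhile (· ≠ '/') ++ '/' :: r ∧ '/' ∉ l.takeWhile (· ≠ '/') ∧
      r = (l.dropWhile (· ≠ '/')).tail := by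
  have hne : l.dropWhile (· ≠ '/') ≠ [] := by
    rw [Ne, List.dropWhile_eq_nil_iff]
    intro hall
    simpa using hall '/' h
  have hhead := List.head_dropWhile_not (fun c => decide (c ≠ '/')) hne
  obtain ⟨c, t, hct⟩ := List.exists_cons_of_ne_nil hne
  have hc : c = '/' := by
    simp only [hct, List.head_cons] at hhead
    simpa using hhead
  refine ⟨t, ?_, ?_, by rw [hct]; rfl⟩
  · conv_lhs => rw [← List.takeWhile_append_dropWhile (p := fun c => decide (c ≠ '/')) (l := l)]
    rw [hct, hc]
  · intro hmem
    have := List.mem_takeWhile_imp hmem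
    simp at this

lemma pvCrux : ∀ (n : Nat) (l : List Char), l.length ≤ n →
    pvZigLoopC (pvSplitAux [] l) =
      (if PySem.Chars.find l ".zig/".toList = -1 then none
       else some ((((l.drop ((PySem.Chars.find l ".zig/".toList).toNat + 5)).takeWhile (· ≠ '/')).reverse.dropWhile (fun c => c == '.')).reverse)) := by
  intro n
  induction n with
  | zero =>
    intro l hl
    have : l = [] := List.eq_nil_of_length_eq_zero (Nat.le_zero.mp hl)
    subst this
    decide
  | succ n ih =>
    intro l hl
    by_cases hsl : '/' ∈ l
    · obtain ⟨r, hlr, hna, hr⟩ := pvDecomp hsl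
      set a := l.takeWhile (· ≠ '/') with hadef
      have hlen : l.length = a.length + 1 + r.length := by rw [hlr]; simp; omega
      have hsplit : pvSplitAux [] l = a :: pvSplitAux [] r := by
        rw [hlr, pvSplitAux_append a r [] hna]; simp
      obtain ⟨t, ht⟩ := pvSplitAux_head r []
      simp only [List.reverse_nil, List.nil_append] at ht
      by_cases hez : PySem.Chars.endswith a ".zig".toList = true
      · -- a ends with ".zig": find l ".zig/" sits exactly at a.length - 4
        obtain ⟨a', ha'⟩ : ∃ a', a' ++ ".zig".toList = a :=
          (PySem.Chars.endswith_iff a _).mp hez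
        have hfind : PySem.Chars.find l ".zig/".toList = (a'.length : Int) := by
          apply pvFind_eq_of_min
          · rw [hlr, ← ha']
            have : (a' ++ ".zig".toList) ++ '/' :: r = a' ++ (".zig/".toList ++ r) := by
              simp [List.append_assoc]
            rw [this, List.drop_left]
            exact List.prefix_append _ _
          · intro i hi hpre
            rw [hlr] at hpre
            have := pvOcc_slash hna hpre
            have hla : a.length = a'.length + 4 := by rw [← ha']; simp
            omega
        rw [hsplit, ht]
        simp only [pvZigLoopC, if_pos hez, hfind]
        have hla : a.length = a'.length + 4 := by rw [← ha']; simp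
        rw [if_neg (by omega)]
        have h5 : ((a'.length : Int).toNat + 5) = a.length + 1 := by omega
        rw [h5, hlr, show a.length + 1 = a.length + 1 + 0 by omega]
        rw [show (a ++ '/' :: r) = (a ++ ['/']) ++ r by simp]
        rw [show a.length + 1 + 0 = (a ++ ['/']).length + 0 by simp]
        rw [List.drop_length_add_append]
        simp
      · -- a does not end with ".zig": shift to r
        have hez' : ¬ ".zig".toList <:+ a := fun hs => hez ((PySem.Chars.endswith_iff a _).mpr hs)
        have hlow : ∀ i, ".zig/".toList <+: l.drop i → a.length + 1 ≤ i := by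
          intro i hp
          rw [hlr] at hp
          exact pvOcc_lower hna hez' i hp
        have hshift : ∀ j : Nat, l.drop (a.length + 1 + j) = r.drop j := by
          intro j
          rw [hlr, show (a ++ '/' :: r) = (a ++ ['/']) ++ r by simp,
            show a.length + 1 + j = (a ++ ['/']).length + j by simp]
          exact List.drop_length_add_append _
        have hloop : pvZigLoopC (pvSplitAux [] l) = pvZigLoopC (pvSplitAux [] r) := by
          rw [hsplit, ht]
          simp only [pvZigLoopC, if_neg hez]
        rw [hloop, ih r (by omega)]
        by_cases hfr : PySem.Chars.find r ".zig/".toList = -1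
        · rw [if_pos hfr, if_pos]
          rw [PySem.Chars.find_eq_neg_one_iff] at hfr ⊢
          intro hinf
          apply hfr
          obtain ⟨j, hj⟩ := (PySem.Chars.exists_prefix_drop_iff_isIn _ _).mpr
            ((PySem.Chars.isIn_iff_infix _ _).mpr hinf)
          have hjl := hlow j hj
          rw [show j = a.length + 1 + (j - (a.length + 1)) by omega, hshift] at hj
          exact pvInfix_of_prefix_drop hj
        · have hge : 0 ≤ PySem.Chars.find r ".zig/".toList := by
            rw [PySem.Chars.find_nonneg_iff]
            rw [← PySem.Chars.find_ne_neg_one_iff]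
            exact hfr
          obtain ⟨hocc, hmin⟩ := PySem.Chars.find_spec hge
          set j := (PySem.Chars.find r ".zig/".toList).toNat with hjdef
          have hfl : PySem.Chars.find l ".zig/".toList = ((a.length + 1 + j : Nat) : Int) := by
            apply pvFind_eq_of_min
            · rw [hshift]; exact hocc
            · intro i hiless hpre
              have hil := hlow i hpre
              rw [show i = a.length + 1 + (i - (a.length + 1)) by omega, hshift] at hpre
              exact hmin _ (by omega) hpre
          rw [if_neg hfr, hfl, if_neg (by omega)]
          have : ((a.length + 1 + j : Nat) : Int).toNat + 5 = a.length + 1 + (j + 5) := by omega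
          rw [this, hshift]
    · -- no '/' in l: single part, no ".zig/" occurrence
      rw [pvSplitAux_no_slash l [] hsl]
      have hfind : PySem.Chars.find l ".zig/".toList = -1 := by
        rw [PySem.Chars.find_eq_neg_one_iff]
        intro hinf
        apply hsl
        apply hinf.mem
        rw [show (".zig/".toList) = [('.' : Char), 'z', 'i', 'g', '/'] from rfl]
        simp
      rw [if_pos hfind]
      simp [pvZigLoopC]

lemma pvZigLoop_map : ∀ (ps : List (List Char)),
    pvZigLoop (List.map String.ofList ps) = Option.map String.ofList (pvZigLoopC ps)
  | [] => by simp [pvZigLoop, pvZigLoopC]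
  | [p] => by simp [pvZigLoop, pvZigLoopC]
  | p :: q :: rest => by
    simp only [List.map_cons, pvZigLoop, pvZigLoopC]
    rw [PySem.Str.endswith_eq, String.toList_ofList]
    split_ifs with h
    · simp [pvRstripDot]
    · simpa [List.map_cons] using pvZigLoop_map (q :: rest)

lemma pvSplit_eq (descriptors : String) :
    PySem.Str.split? descriptors "/" =
      some (List.map String.ofList (pvSplitAux [] descriptors.toList)) := by
  rw [PySem.Str.split?.eq_1, PySem.Chars.split?.eq_1]
  rw [show ("/" : String).toList = ['/'] from rfl]
  rw [if_neg (by simp)]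
  rw [show PySem.Chars.splitOn descriptors.toList ['/'] =
    PySem.Chars.splitOn.go ['/'] (descriptors.toList.length + 1) descriptors.toList [] [] from rfl]
  rw [pvSplitOn_go_eq _ _ _ _ (by omega)]
  rfl

-- ===== VERDICT (by name: the statement is the Claim_ definition above) =====
theorem extract_zig_local_module_path_py_spec : Claim_equal_extract_zig_local_module_path_py := by
  intro descriptors _
  unfold Spec_extract_zig_local_module_path_py
  unfold extract_zig_local_module_path_py extract_zig_local_module_path_py_alt
  by_cases hin : PySem.Str.isIn "/" descriptors = true
  · rw [if_pos hin, if_pos hin]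
    have hmem : '/' ∈ descriptors.toList := by
      rw [PySem.Str.isIn_eq, PySem.Chars.isIn_iff_infix,
        show ("/" : String).toList = ['/'] from rfl] at hin
      exact (List.singleton_infix_iff '/' descriptors.toList).mp hin
    rw [pvSplit_eq descriptors]
    simp only []
    rw [if_pos (by
      rw [List.length_map]
      exact pvSplitAux_len2 descriptors.toList [] hmem)]
    rw [pvZigLoop_map, pvCrux descriptors.toList.length descriptors.toList (Nat.le_refl _)]
    have hfindeq : PySem.Str.find descriptors ".zig/" =
        PySem.Chars.find descriptors.toList ".zig/".toList := PySem.Str.find_eq _ _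
    by_cases hf : PySem.Chars.find descriptors.toList ".zig/".toList = -1
    · -- no ".zig/" occurrence: both take the file_part fallback
      rw [if_pos hf]
      rw [if_neg (by rw [hfindeq]; simpa using hf)]
      obtain ⟨t, ht⟩ := pvSplitAux_head descriptors.toList []
      simp only [List.reverse_nil, List.nil_append] at ht
      rw [ht]
      rw [pvSplitMax_head descriptors, if_pos hmem]
      simp only [Option.map_none, List.map_cons]
    · rw [if_neg hf]
      rw [if_pos (by rw [hfindeq]; simpa using hf)]
      have hge : (0 : Int) ≤ PySem.Chars.find descriptors.toList ".zig/".toList := by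
        rw [PySem.Chars.find_nonneg_iff, ← PySem.Chars.find_ne_neg_one_iff]
        exact hf
      set f := PySem.Chars.find descriptors.toList ".zig/".toList with hfdef
      have htail : (PySem.Str.slice descriptors (some (PySem.Str.find descriptors ".zig/" + 5)) none).toList
          = descriptors.toList.drop (f.toNat + 5) := by
        rw [PySem.Str.toList_slice, PySem.Chars.slice_eq_listSlice, hfindeq]
        rw [PySem.List.slice_from descriptors.toList (show (0:Int) ≤ f + 5 by omega)]
        congr 1
        omega
      rw [pvSplitMax_head (PySem.Str.slice descriptors (some (PySem.Str.find descriptors ".zig/" + 5)) none)]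
      rw [htail]
      by_cases hms : '/' ∈ descriptors.toList.drop (f.toNat + 5)
      · rw [if_pos hms]
        simp only [List.map_cons, Option.map_some, pvRstripDot, String.toList_ofList]
      · rw [if_neg hms]
        simp only [List.map_cons, Option.map_some, pvRstripDot, String.toList_ofList]
        rw [List.takeWhile_eq_self_iff.mpr (by
          intro x hx
          simp only [decide_eq_true_eq]
          rintro rfl
          exact hms hx)]
  · rw [if_neg hin, if_neg hin]
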